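-- pv_equiv track=rewrite | github.com/TumsaUmata/the_last_lap | Google Assessment/Intern/maximum_number_of_strawberries.py | strawberry1
-- ===== SOURCE A (Python) =====
-- def strawberry1(num, n, arr):
--     dp = [[0] * (num + 1) for _ in range(len(arr) + 1)]
--     for i in range(arr[0], num + 1):
--         dp[1][i] = arr[0]
--     for i in range(2, len(arr) + 1):
--         for j in range(1, num + 1):
--             dp[i][j] = dp[i - 1][j]
--             if j >= arr[i - 1]:
--                 dp[i][j] = max(dp[i][j],
--                                dp[i - 2][j - arr[i - 1]] + arr[i - 1])  # here is the only thing that changed: "i - 2"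
--     return dp[-1][-1]
-- ===== SOURCE B (Python) =====
-- def strawberry1(num, n, arr):
--     cache = [[None] * (num + 1) for _ in range(len(arr) + 1)]
--
--     def f(i, j):
--         if i == 0:
--             return 0
--         if i == 1:
--             return arr[0] if j >= arr[0] else 0
--         if cache[i][j] is not None:
--             return cache[i][j]
--         w = arr[i - 1]
--         res = f(i - 1, j)
--         if j >= w:
--             res = max(res, f(i - 2, j - w) + w)
--         cache[i][j] = res
--         return res
--
--     return f(len(arr), num)
-- ===== Notes on version B (the rewrite author's own statement) =====
-- stated objective: alternative
-- what changed: Replaced A's bottom-up 2D DP table (pre-allocated (len(arr)+1) x (num+1) list-of-lists filled by nested index loops) with a top-down memoized recursion f(i, j) over a dict cache implementing the same non-adjacent-knapsack recurrence.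
-- outside the precondition, e.g. on strawberry1(0, 0, [-1, -1]): A returns 0, B returns -1; on strawberry1(2, 0, [-1]): A returns -1, B returns -1
import Mathlib
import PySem

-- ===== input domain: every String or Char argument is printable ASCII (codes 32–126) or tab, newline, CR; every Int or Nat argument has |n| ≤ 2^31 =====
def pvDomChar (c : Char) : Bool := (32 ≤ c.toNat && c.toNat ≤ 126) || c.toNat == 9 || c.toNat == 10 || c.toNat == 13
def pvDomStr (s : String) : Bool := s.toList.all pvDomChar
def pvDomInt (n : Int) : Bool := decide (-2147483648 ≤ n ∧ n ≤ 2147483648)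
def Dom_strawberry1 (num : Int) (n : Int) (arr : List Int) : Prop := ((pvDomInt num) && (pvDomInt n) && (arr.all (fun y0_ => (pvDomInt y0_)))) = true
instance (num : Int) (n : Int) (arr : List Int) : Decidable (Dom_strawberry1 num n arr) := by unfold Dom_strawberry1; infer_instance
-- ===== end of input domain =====

-- B replaces A's bottom-up 2D table with a top-down memoized recursion on (i, j)
-- (dict cache), the same non-adjacent-knapsack recurrence: an alternative decomposition.

-- ===== PORT A =====
-- Python-list indexing on arrays (same index semantics as PySem's list primitives,
-- incl. negative wraparound; O(1) access because Python lists are arrays)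
def pvAGetD {α : Type} (T : Array α) (i : Int) (d : α) : α :=
  match PySem.List.pyIdx? T.size i with
  | some k => T.getD k d
  | none => d

def pvASetD {α : Type} (T : Array α) (i : Int) (v : α) : Array α :=
  match PySem.List.pyIdx? T.size i with
  | some k => T.setIfInBounds k v
  | none => T

-- dp[i][j] read / dp[i][j] = v on the table
def aGet2 (T : Array (Array Int)) (i j : Int) : Int :=
  pvAGetD (pvAGetD T i #[]) j 0

def aSet2 (T : Array (Array Int)) (i j : Int) (v : Int) : Array (Array Int) :=
  match PySem.List.pyIdx? T.size i with
  | some k => T.modify k (fun row => pvASetD row j v)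
  | none => T

def strawberry1 (num : Int) (n : Int) (arr : List Int) : Int :=
  -- [0] * (num + 1): .toNat clamps a negative count to the empty list, as Python list-mult does
  let dp0 : Array (Array Int) :=
    Array.replicate (arr.length + 1) (Array.replicate (num + 1).toNat 0)
  let a0 : Int := PySem.List.pyGetD arr 0 0   -- arr[0]; Pre_ requires arr ≠ []
  let dp1 := (PySem.List.pyRange a0 (num + 1) 1).foldl (fun dp i => aSet2 dp 1 i a0) dp0
  let dp2 := (PySem.List.pyRange 2 ((arr.length : Int) + 1) 1).foldl (fun dp i =>
      (PySem.List.pyRange 1 (num + 1) 1).foldl (fun dp j =>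
        let w := PySem.List.pyGetD arr (i - 1) 0
        let dpa := aSet2 dp i j (aGet2 dp (i - 1) j)
        if j ≥ w then
          aSet2 dpa i j (max (aGet2 dpa i j) (aGet2 dpa (i - 2) (j - w) + w))
        else dpa) dp) dp1
  aGet2 dp2 (-1) (-1)   -- dp[-1][-1]

-- ===== PORT B =====
-- f(i, j) of Source B: best value from the first i berries within capacity j,
-- memoized in an (i, j)-keyed dict threaded through the calls.
def pvAltF (arr : List Int) (first : Int) : Nat → Int → PySem.Dict (Int × Int) Int →
    Int × PySem.Dict (Int × Int) Int
  | 0, _, cache => (0, cache)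
  | 1, j, cache => (if j ≥ first then first else 0, cache)
  | (i+2), j, cache =>
      let key : Int × Int := ((i : Int) + 2, j)
      match cache.get? key with
      | some v => (v, cache)
      | none =>
        let w := PySem.List.pyGetD arr ((i : Int) + 1) 0
        let p1 := pvAltF arr first (i+1) j cache
        let p2 := if j ≥ w then
            let q := pvAltF arr first i (j - w) p1.2
            (max p1.1 (q.1 + w), q.2)
          else p1
        (p2.1, p2.2.insert key p2.1)

def strawberry1_alt (num : Int) (n : Int) (arr : List Int) : Int :=
  let first := PySem.List.pyGetD arr 0 0   -- arr[0]; Pre_ requires arr ≠ []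
  (pvAltF arr first arr.length num PySem.Dict.empty).1

-- ===== PRECONDITION & SPEC =====
-- Pre_ restricts to the task's natural domain (nonnegative capacity, nonempty list of
-- nonnegative berry counts): outside it A raises IndexError (empty arr; num < 0; a negative
-- element reached by dp[i-2][j - arr[i-1]]) or, on a lone/unreached negative element, returns
-- a value produced by Python's negative-index wraparound in dp[1][i] = arr[0].
def Pre_strawberry1 (num : Int) (n : Int) (arr : List Int) : Prop :=
  0 ≤ num ∧ arr ≠ [] ∧ ∀ x ∈ arr, 0 ≤ x
instance (num : Int) (n : Int) (arr : List Int) : Decidable (Pre_strawberry1 num n arr) := by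
  unfold Pre_strawberry1; infer_instance

def pvWitness_strawberry1 : Int × Int × List Int := (10, 0, [3, 4, 5])

def Spec_strawberry1 (num : Int) (n : Int) (arr : List Int) (out : Int) : Prop := out = strawberry1_alt num n arr
instance (num : Int) (n : Int) (arr : List Int) (out : Int) : Decidable (Spec_strawberry1 num n arr out) := by unfold Spec_strawberry1; infer_instance

-- ===== CLAIM (what is proved, stated in full; the proofs are below) =====
def Claim_equal_strawberry1 : Prop := ∀ (num : Int) (n : Int) (arr : List Int), Dom_strawberry1 num n arr → Pre_strawberry1 num n arr → Spec_strawberry1 num n arr (strawberry1 num n arr)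

-- ===== LEMMAS AND PROOFS =====

-- list-level mirror of the table operations (proof-side)
def pvGet2 (T : List (List Int)) (i j : Int) : Int :=
  PySem.List.pyGetD (PySem.List.pyGetD T i []) j 0

def pvSet2 (T : List (List Int)) (i j : Int) (v : Int) : List (List Int) :=
  PySem.List.pySetD T i (PySem.List.pySetD (PySem.List.pyGetD T i []) j v)

-- list-level model of A's table program (proved equal to the Array port below)
def pvListA (num : Int) (n : Int) (arr : List Int) : Int :=
  let dp0 : List (List Int) :=
    List.replicate (arr.length + 1) (List.replicate (num + 1).toNat 0)
  let a0 : Int := PySem.List.pyGetD arr 0 0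
  let dp1 := (PySem.List.pyRange a0 (num + 1) 1).foldl (fun dp i => pvSet2 dp 1 i a0) dp0
  let dp2 := (PySem.List.pyRange 2 ((arr.length : Int) + 1) 1).foldl (fun dp i =>
      (PySem.List.pyRange 1 (num + 1) 1).foldl (fun dp j =>
        let w := PySem.List.pyGetD arr (i - 1) 0
        let dpa := pvSet2 dp i j (pvGet2 dp (i - 1) j)
        if j ≥ w then
          pvSet2 dpa i j (max (pvGet2 dpa i j) (pvGet2 dpa (i - 2) (j - w) + w))
        else dpa) dp) dp1
  pvGet2 dp2 (-1) (-1)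

-- the recurrence both programs compute
def pvF (arr : List Int) (first : Int) : Nat → Int → Int
  | 0, _ => 0
  | 1, j => if j ≥ first then first else 0
  | (i+2), j =>
      let w := PySem.List.pyGetD arr ((i : Int) + 1) 0
      let r := pvF arr first (i+1) j
      if j ≥ w then max r (pvF arr first i (j - w) + w) else r

theorem pvW_nonneg (arr : List Int) (hnn : ∀ x ∈ arr, 0 ≤ x) (t : Int) :
    0 ≤ PySem.List.pyGetD arr t 0 := by
  by_cases h : PySem.Raise.InRange arr.length t
  · exact hnn _ (PySem.List.pyGetD_mem arr 0 h)
  · rw [PySem.List.pyGetD_of_none arr t 0 ((PySem.List.pyGet?_eq_none_iff arr t).mpr h)]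

theorem pvF_zero (arr : List Int) (first : Int) (h0 : 0 ≤ first) (hnn : ∀ x ∈ arr, 0 ≤ x)
    (i : Nat) : pvF arr first i 0 = 0 := by
  induction i using Nat.twoStepInduction with
  | zero => rfl
  | one => simp only [pvF]; split <;> omega
  | more i ih1 ih2 =>
    have hw := pvW_nonneg arr hnn ((i : Int) + 1)
    simp only [pvF, ih2]
    split
    · have h2 : (0 : Int) - PySem.List.pyGetD arr ((i : Int) + 1) 0 = 0 := by omega
      rw [h2, ih1]
      omega
    · rfl

-- ---- B side: the memoized recursion computes pvF ----

def pvGoodC (arr : List Int) (first : Int) (c : PySem.Dict (Int × Int) Int) : Prop :=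
  ∀ (i : Nat) (j v : Int), c.get? ((i : Int), j) = some v → v = pvF arr first i j

theorem pvAltF_spec (arr : List Int) (first : Int) (i : Nat) : ∀ (j : Int)
    (c : PySem.Dict (Int × Int) Int), pvGoodC arr first c →
    (pvAltF arr first i j c).1 = pvF arr first i j ∧
      pvGoodC arr first (pvAltF arr first i j c).2 := by
  induction i using Nat.twoStepInduction with
  | zero => intro j c hc; exact ⟨rfl, hc⟩
  | one => intro j c hc; exact ⟨rfl, hc⟩
  | more i ih1 ih2 =>
    intro j c hc
    simp only [pvAltF]
    rcases hkey : c.get? ((i : Int) + 2, j) with _ | v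
    · simp only []
      obtain ⟨e1, g1⟩ := ih2 j c hc
      have hmain : ((if j ≥ PySem.List.pyGetD arr ((i : Int) + 1) 0 then
            ((max (pvAltF arr first (i+1) j c).1
              ((pvAltF arr first i (j - PySem.List.pyGetD arr ((i : Int) + 1) 0) (pvAltF arr first (i+1) j c).2).1 + PySem.List.pyGetD arr ((i : Int) + 1) 0)),
              (pvAltF arr first i (j - PySem.List.pyGetD arr ((i : Int) + 1) 0) (pvAltF arr first (i+1) j c).2).2)
          else pvAltF arr first (i+1) j c) : Int × PySem.Dict (Int × Int) Int).1
          = pvF arr first (i+2) j ∧ pvGoodC arr first ((if j ≥ PySem.List.pyGetD arr ((i : Int) + 1) 0 then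
            ((max (pvAltF arr first (i+1) j c).1
              ((pvAltF arr first i (j - PySem.List.pyGetD arr ((i : Int) + 1) 0) (pvAltF arr first (i+1) j c).2).1 + PySem.List.pyGetD arr ((i : Int) + 1) 0)),
              (pvAltF arr first i (j - PySem.List.pyGetD arr ((i : Int) + 1) 0) (pvAltF arr first (i+1) j c).2).2)
          else pvAltF arr first (i+1) j c) : Int × PySem.Dict (Int × Int) Int).2 := by
        by_cases hj : j ≥ PySem.List.pyGetD arr ((i : Int) + 1) 0
        · obtain ⟨e2, g2⟩ := ih1 (j - PySem.List.pyGetD arr ((i : Int) + 1) 0) _ g1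
          rw [if_pos hj]
          exact ⟨by simp only [pvF, if_pos hj, e1, e2], g2⟩
        · rw [if_neg hj]
          exact ⟨by simp only [pvF, if_neg hj, e1], g1⟩
      refine ⟨hmain.1, ?_⟩
      intro k j' v hg
      rw [PySem.Dict.get?_insert] at hg
      split at hg
      · rename_i hkj
        have hk1 : (k : Int) = (i : Int) + 2 := congrArg Prod.fst hkj
        have hk2 : j' = j := congrArg Prod.snd hkj
        have hk : k = i + 2 := by omega
        subst hk; subst hk2
        have := hmain.1
        injection hg with hv
        omega
      · exact hmain.2 k j' v hg
    · simp only []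
      have := hc (i+2) j v (by push_cast at hkey ⊢; exact hkey)
      exact ⟨this ▸ rfl, hc⟩

theorem pvAlt_eq_pvF (num : Int) (n : Int) (arr : List Int) :
    strawberry1_alt num n arr = pvF arr (PySem.List.pyGetD arr 0 0) arr.length num := by
  simp only [strawberry1_alt]
  exact (pvAltF_spec arr _ arr.length num PySem.Dict.empty
    (fun i j v h => by rw [PySem.Dict.get?_empty] at h; exact absurd h (by simp))).1

-- ---- A side: the table build computes pvF row by row ----

theorem set_map_range {α : Type} (t : Nat) (v : α) (f : Nat → α) (n : Nat) :
    ((List.range n).map f).set t v = (List.range n).map (fun j => if j = t then v else f j) := by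
  apply List.ext_getElem
  · simp
  · intro i hi hi2
    rw [List.getElem_set]
    simp only [List.getElem_map, List.getElem_range]
    by_cases h : t = i
    · simp [h]
    · simp [h, Ne.symm h]

theorem pvGet2_map_range (g : Nat → List Int) (n k j : Nat) (hk : k < n) :
    pvGet2 ((List.range n).map g) (k : Int) (j : Int) = (g k).getD j 0 := by
  simp only [pvGet2, PySem.List.pyGetD_natCast]
  rw [PySem.List.getD_map_range _ _ _ _ hk]

theorem pvSet2_map_range (g : Nat → List Int) (n k j : Nat) (v : Int) (hk : k < n) :
    pvSet2 ((List.range n).map g) (k : Int) (j : Int) v =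
      (List.range n).map (fun k' => if k' = k then (g k).set j v else g k') := by
  simp only [pvSet2, PySem.List.pyGetD_natCast, PySem.List.pySetD_natCast]
  rw [PySem.List.getD_map_range _ _ _ _ hk, set_map_range]

def pvZeros (N : Nat) : List Int := List.replicate (N+1) 0

def pvRow (arr : List Int) (first : Int) (N k : Nat) : List Int :=
  (List.range (N+1)).map (fun j : Nat => pvF arr first k (j : Int))

def pvTab (arr : List Int) (first : Int) (N L m : Nat) : List (List Int) :=
  (List.range (L+1)).map (fun k => if k ≤ m then pvRow arr first N k else pvZeros N)

def pvPartial (arr : List Int) (first : Int) (N i u : Nat) : List Int :=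
  (List.range (N+1)).map (fun j => if 1 ≤ j ∧ j ≤ u then pvF arr first i (j : Int) else 0)

def pvMid (arr : List Int) (first : Int) (N L m u : Nat) : List (List Int) :=
  (List.range (L+1)).map (fun k =>
    if k ≤ m+1 then pvRow arr first N k
    else if k = m+2 then pvPartial arr first N (m+2) u
    else pvZeros N)

theorem pvZeros_eq_map (N : Nat) : pvZeros N = (List.range (N+1)).map (fun _ => 0) := by
  simp [pvZeros, List.map_const']

theorem pvMid_zero (arr : List Int) (first : Int) (N L m : Nat) :
    pvMid arr first N L m 0 = pvTab arr first N L (m+1) := by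
  unfold pvMid pvTab
  apply List.map_congr_left
  intro k _
  by_cases h1 : k ≤ m + 1
  · simp [h1]
  · by_cases h2 : k = m + 2
    · rw [if_neg h1, if_pos h2, if_neg (by omega), pvPartial, pvZeros_eq_map]
      apply List.map_congr_left
      intro j _
      rw [if_neg (by omega)]
    · rw [if_neg h1, if_neg h2, if_neg (by omega)]

theorem pvMid_last (arr : List Int) (first : Int) (N L m : Nat) (h0 : 0 ≤ first)
    (hnn : ∀ x ∈ arr, 0 ≤ x) :
    pvMid arr first N L m N = pvTab arr first N L (m+2) := by
  unfold pvMid pvTab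
  apply List.map_congr_left
  intro k _
  by_cases h1 : k ≤ m + 1
  · rw [if_pos h1, if_pos (by omega)]
  · by_cases h2 : k = m + 2
    · rw [if_neg h1, if_pos h2, if_pos (by omega), h2, pvPartial, pvRow]
      apply List.ext_getElem
      · simp
      · intro j hj hj2
        simp only [List.length_map, List.length_range] at hj hj2
        simp only [List.getElem_map, List.getElem_range]
        by_cases hj1 : 1 ≤ j
        · rw [if_pos ⟨hj1, by omega⟩]
        · have hj0 : j = 0 := by omega
          subst hj0
          rw [if_neg (by omega)]
          exact (pvF_zero arr first h0 hnn (m+2)).symm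
    · rw [if_neg h1, if_neg h2, if_neg (by omega)]

theorem pvF_succ2 (arr : List Int) (first : Int) (m : Nat) (j : Int) :
    pvF arr first (m+2) j =
      (if j ≥ PySem.List.pyGetD arr ((m+1 : Nat) : Int) 0 then
        max (pvF arr first (m+1) j)
          (pvF arr first m (j - PySem.List.pyGetD arr ((m+1 : Nat) : Int) 0) +
            PySem.List.pyGetD arr ((m+1 : Nat) : Int) 0)
      else pvF arr first (m+1) j) := by
  simp only [pvF]
  norm_cast

theorem pv_inner_step (arr : List Int) (first : Int) (N L m u : Nat) (h0 : 0 ≤ first)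
    (hnn : ∀ x ∈ arr, 0 ≤ x) (hm : m + 2 ≤ L) (hu : u + 1 ≤ N) :
    (let w := PySem.List.pyGetD arr (((m : Int) + 2) - 1) 0
     let dpa := pvSet2 (pvMid arr first N L m u) ((m : Int) + 2) ((u : Int) + 1)
        (pvGet2 (pvMid arr first N L m u) (((m : Int) + 2) - 1) ((u : Int) + 1))
     if ((u : Int) + 1) ≥ w then
       pvSet2 dpa ((m : Int) + 2) ((u : Int) + 1)
         (max (pvGet2 dpa ((m : Int) + 2) ((u : Int) + 1))
           (pvGet2 dpa (((m : Int) + 2) - 2) (((u : Int) + 1) - w) + w))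
     else dpa) = pvMid arr first N L m (u+1) := by
  have e2 : ((u : Int) + 1) = ((u+1 : Nat) : Int) := by push_cast; ring
  have e3 : ((m : Int) + 2) = ((m+2 : Nat) : Int) := by push_cast; ring
  have e1' : ((m+2 : Nat) : Int) - 1 = ((m+1 : Nat) : Int) := by push_cast; ring
  have e4' : ((m+2 : Nat) : Int) - 2 = ((m : Nat) : Int) := by push_cast; ring
  simp only [e2, e3]
  simp only [e1', e4']
  set w := PySem.List.pyGetD arr ((m+1 : Nat) : Int) 0 with hw_def
  have hwnn : 0 ≤ w := pvW_nonneg arr hnn _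
  set gM : Nat → List Int := fun k =>
    if k ≤ m+1 then pvRow arr first N k
    else if k = m+2 then pvPartial arr first N (m+2) u
    else pvZeros N with hgM
  have hMid : pvMid arr first N L m u = (List.range (L+1)).map gM := rfl
  have hgMle : ∀ k, k ≤ m+1 → gM k = pvRow arr first N k := fun k hk => if_pos hk
  have hgMm2 : gM (m+2) = pvPartial arr first N (m+2) u := by
    show (if m+2 ≤ m+1 then pvRow arr first N (m+2)
      else if m+2 = m+2 then pvPartial arr first N (m+2) u else pvZeros N) = _
    rw [if_neg (by omega), if_pos rfl]
  have hgMgt : ∀ k, ¬(k ≤ m+1) → k ≠ m+2 → gM k = pvZeros N := fun k h1 h2 => by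
    show (if k ≤ m+1 then pvRow arr first N k
      else if k = m+2 then pvPartial arr first N (m+2) u else pvZeros N) = _
    rw [if_neg h1, if_neg h2]
  have hval : pvGet2 (pvMid arr first N L m u) ((m+1 : Nat) : Int) ((u+1 : Nat) : Int)
      = pvF arr first (m+1) ((u+1 : Nat) : Int) := by
    rw [hMid, pvGet2_map_range gM (L+1) (m+1) (u+1) (by omega),
      hgMle (m+1) le_rfl, pvRow, PySem.List.getD_map_range _ _ _ _ (by omega)]
  rw [hval]
  set val := pvF arr first (m+1) ((u+1 : Nat) : Int) with hval_def
  have hdpa : pvSet2 (pvMid arr first N L m u) ((m+2 : Nat) : Int) ((u+1 : Nat) : Int) val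
      = (List.range (L+1)).map (fun k' =>
          if k' = m+2 then (pvPartial arr first N (m+2) u).set (u+1) val else gM k') := by
    rw [hMid, pvSet2_map_range gM (L+1) (m+2) (u+1) val (by omega), hgMm2]
  rw [hdpa]
  set gA : Nat → List Int := fun k' =>
    if k' = m+2 then (pvPartial arr first N (m+2) u).set (u+1) val else gM k' with hgA
  have hgA2 : gA (m+2) = (pvPartial arr first N (m+2) u).set (u+1) val := if_pos rfl
  have hgAne : ∀ k, k ≠ m+2 → gA k = gM k := fun k hk => if_neg hk
  have hgetA : pvGet2 ((List.range (L+1)).map gA) ((m+2 : Nat) : Int) ((u+1 : Nat) : Int) = val := by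
    rw [pvGet2_map_range gA (L+1) (m+2) (u+1) (by omega), hgA2, pvPartial, set_map_range,
      PySem.List.getD_map_range _ _ _ _ (by omega)]
    simp
  have hrow : ∀ X : Int, X = pvF arr first (m+2) ((u+1 : Nat) : Int) →
      ((List.range (N+1)).map (fun j => if j = u+1 then X
          else if 1 ≤ j ∧ j ≤ u then pvF arr first (m+2) (j : Int) else 0))
        = pvPartial arr first N (m+2) (u+1) := by
    intro X hX
    rw [pvPartial]
    apply List.map_congr_left
    intro j hj
    simp only [List.mem_range] at hj
    by_cases h : j = u+1
    · rw [if_pos h, if_pos (by omega), h, hX]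
    · rw [if_neg h]
      by_cases h2 : 1 ≤ j ∧ j ≤ u
      · rw [if_pos h2, if_pos ⟨h2.1, by omega⟩]
      · rw [if_neg h2, if_neg (by omega)]
  by_cases hbr : ((u+1 : Nat) : Int) ≥ w
  · rw [if_pos hbr, hgetA]
    have ht : ∃ t : Nat, ((u+1 : Nat) : Int) - w = (t : Int) ∧ t ≤ u + 1 :=
      ⟨(((u+1 : Nat) : Int) - w).toNat, (Int.toNat_of_nonneg (by omega)).symm, by omega⟩
    obtain ⟨t, htc, htle⟩ := ht
    have hgetB : pvGet2 ((List.range (L+1)).map gA) ((m : Nat) : Int) (((u+1 : Nat) : Int) - w)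
        = pvF arr first m (((u+1 : Nat) : Int) - w) := by
      rw [htc, pvGet2_map_range gA (L+1) m t (by omega), hgAne m (by omega),
        hgMle m (by omega), pvRow, PySem.List.getD_map_range _ _ _ _ (by omega)]
    rw [hgetB]
    rw [pvSet2_map_range gA (L+1) (m+2) (u+1) _ (by omega), hgA2]
    unfold pvMid
    apply List.map_congr_left
    intro k hk
    beta_reduce
    by_cases h : k = m+2
    · rw [if_pos h, if_neg (show ¬ k ≤ m+1 by omega), if_pos h, List.set_set, pvPartial,
        set_map_range]
      refine hrow _ ?_
      rw [pvF_succ2, if_pos hbr, hval_def]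
    · rw [if_neg h, hgAne k h, if_neg h]
      by_cases h1 : k ≤ m+1
      · rw [hgMle k h1, if_pos h1]
      · rw [hgMgt k h1 h, if_neg h1]
  · rw [if_neg hbr]
    unfold pvMid
    apply List.map_congr_left
    intro k hk
    by_cases h : k = m+2
    · subst h
      rw [hgA2, if_neg (by omega), if_pos rfl, pvPartial, set_map_range]
      refine hrow _ ?_
      rw [pvF_succ2, if_neg hbr, hval_def]
    · rw [hgAne k h, if_neg h]
      by_cases h1 : k ≤ m+1
      · rw [hgMle k h1, if_pos h1]
      · rw [hgMgt k h1 h, if_neg h1]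

theorem pv_inner_fold (arr : List Int) (first : Int) (N L m : Nat) (h0 : 0 ≤ first)
    (hnn : ∀ x ∈ arr, 0 ≤ x) (hm : m + 2 ≤ L) : ∀ u, u ≤ N →
    (PySem.List.pyRange 1 ((u : Int) + 1) 1).foldl (fun dp j =>
        let w := PySem.List.pyGetD arr (((m : Int) + 2) - 1) 0
        let dpa := pvSet2 dp ((m : Int) + 2) j (pvGet2 dp (((m : Int) + 2) - 1) j)
        if j ≥ w then
          pvSet2 dpa ((m : Int) + 2) j
            (max (pvGet2 dpa ((m : Int) + 2) j) (pvGet2 dpa (((m : Int) + 2) - 2) (j - w) + w))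
        else dpa)
      (pvTab arr first N L (m+1)) = pvMid arr first N L m u := by
  intro u
  induction u with
  | zero =>
    intro _
    rw [show ((0 : Nat) : Int) + 1 = 1 by norm_num, PySem.List.pyRange_one_eq_nil le_rfl,
      List.foldl_nil, pvMid_zero]
  | succ u ih =>
    intro hu
    rw [show ((u+1 : Nat) : Int) + 1 = (((u : Nat) : Int) + 1) + 1 by push_cast; ring,
      PySem.List.pyRange_one_succ_right (by omega), List.foldl_append, ih (by omega),
      List.foldl_cons, List.foldl_nil]
    exact pv_inner_step arr first N L m u h0 hnn hm hu

theorem pv_outer_fold (arr : List Int) (first : Int) (N L : Nat) (h0 : 0 ≤ first)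
    (hnn : ∀ x ∈ arr, 0 ≤ x) : ∀ t, t + 1 ≤ L →
    (PySem.List.pyRange 2 ((t : Int) + 2) 1).foldl (fun dp i =>
        (PySem.List.pyRange 1 ((N : Int) + 1) 1).foldl (fun dp j =>
          let w := PySem.List.pyGetD arr (i - 1) 0
          let dpa := pvSet2 dp i j (pvGet2 dp (i - 1) j)
          if j ≥ w then
            pvSet2 dpa i j (max (pvGet2 dpa i j) (pvGet2 dpa (i - 2) (j - w) + w))
          else dpa) dp)
      (pvTab arr first N L 1) = pvTab arr first N L (t+1) := by
  intro t
  induction t with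
  | zero =>
    intro _
    rw [show ((0 : Nat) : Int) + 2 = 2 by norm_num, PySem.List.pyRange_one_eq_nil le_rfl,
      List.foldl_nil]
  | succ t ih =>
    intro ht
    rw [show ((t+1 : Nat) : Int) + 2 = (((t : Nat) : Int) + 2) + 1 by push_cast; ring,
      PySem.List.pyRange_one_succ_right (a := 2) (b := ((t : Nat) : Int) + 2) (by omega),
      List.foldl_append, ih (by omega), List.foldl_cons, List.foldl_nil]
    beta_reduce
    rw [pv_inner_fold arr first N L t h0 hnn (by omega) N le_rfl, pvMid_last arr first N L t h0 hnn]

theorem pvTab_zero (arr : List Int) (first : Int) (N L : Nat) :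
    List.replicate (L+1) (List.replicate (N+1) (0 : Int)) = pvTab arr first N L 0 := by
  unfold pvTab
  rw [List.map_congr_left (g := fun _ => pvZeros N) ?_, List.map_const', List.length_range]
  · rfl
  · intro k _
    by_cases h : k ≤ 0
    · rw [if_pos h, show k = 0 by omega]
      rw [pvRow, pvZeros_eq_map]
      rfl
    · rw [if_neg h]

theorem pv_row1_fold (arr : List Int) (first : Int) (N L : Nat) (h0 : 0 ≤ first)
    (hnn : ∀ x ∈ arr, 0 ≤ x) (hL : 1 ≤ L) :
    (PySem.List.pyRange first ((N : Int) + 1) 1).foldl (fun dp i => pvSet2 dp 1 i first)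
      (List.replicate (L+1) (List.replicate (N+1) 0)) = pvTab arr first N L 1 := by
  rw [pvTab_zero arr first N L]
  by_cases hc : first ≤ (N : Int)
  · -- first = ↑A0 with A0 ≤ N
    obtain ⟨A0, rfl⟩ : ∃ A0 : Nat, first = (A0 : Int) :=
      ⟨first.toNat, (Int.toNat_of_nonneg h0).symm⟩
    have hA0 : A0 ≤ N := by exact_mod_cast hc
    set gT : Nat → Nat → List Int := fun u k =>
      if k = 1 then (List.range (N+1)).map (fun j => if A0 ≤ j ∧ j < A0 + u then (A0 : Int) else 0)
      else pvZeros N with hgT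
    have main : ∀ u, u ≤ N + 1 - A0 →
        (PySem.List.pyRange (A0 : Int) ((A0 : Int) + (u : Int)) 1).foldl
          (fun dp i => pvSet2 dp 1 i (A0 : Int)) (pvTab arr (A0 : Int) N L 0)
          = (List.range (L+1)).map (gT u) := by
      intro u
      induction u with
      | zero =>
        intro _
        rw [show ((A0 : Int) + ((0 : Nat) : Int)) = (A0 : Int) by norm_num,
          PySem.List.pyRange_one_eq_nil le_rfl, List.foldl_nil]
        unfold pvTab
        apply List.map_congr_left
        intro k _
        by_cases h : k = 1
        · rw [hgT]
          beta_reduce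
          rw [if_pos h, if_neg (by omega), pvZeros_eq_map]
          apply List.map_congr_left
          intro j _
          rw [if_neg (by omega)]
        · rw [hgT]
          beta_reduce
          rw [if_neg h]
          by_cases h2 : k ≤ 0
          · rw [if_pos h2, show k = 0 by omega, pvRow, pvZeros_eq_map]
            rfl
          · rw [if_neg h2]
      | succ u ih =>
        intro hu
        rw [show ((A0 : Int) + ((u+1 : Nat) : Int)) = ((A0 : Int) + ((u : Nat) : Int)) + 1
            by push_cast; ring,
          PySem.List.pyRange_one_succ_right (by omega), List.foldl_append, ih (by omega),
          List.foldl_cons, List.foldl_nil]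
        beta_reduce
        rw [show ((A0 : Int) + ((u : Nat) : Int)) = ((A0 + u : Nat) : Int) by push_cast; ring,
          show (1 : Int) = ((1 : Nat) : Int) by norm_num,
          pvSet2_map_range (gT u) (L+1) 1 (A0+u) _ (by omega)]
        apply List.map_congr_left
        intro k _
        beta_reduce
        by_cases h : k = 1
        · rw [if_pos h, hgT]
          beta_reduce
          rw [if_pos rfl, if_pos h, set_map_range]
          apply List.map_congr_left
          intro j _
          by_cases hj : j = A0 + u
          · rw [if_pos hj, if_pos (by omega)]
          · rw [if_neg hj]
            by_cases hj2 : A0 ≤ j ∧ j < A0 + u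
            · rw [if_pos hj2, if_pos ⟨hj2.1, by omega⟩]
            · rw [if_neg hj2, if_neg (by omega)]
        · rw [if_neg h, hgT]
          beta_reduce
          rw [if_neg h, if_neg h]
    have hbound : ((A0 : Int) + ((N + 1 - A0 : Nat) : Int)) = (N : Int) + 1 := by
      have h2 : A0 + (N + 1 - A0) = N + 1 := by omega
      omega
    have := main (N + 1 - A0) le_rfl
    rw [hbound] at this
    rw [this]
    unfold pvTab
    apply List.map_congr_left
    intro k _
    rw [hgT]
    beta_reduce
    by_cases h : k = 1
    · rw [if_pos h, if_pos (by omega), h, pvRow]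
      apply List.map_congr_left
      intro j hj
      simp only [List.mem_range] at hj
      show _ = pvF arr (A0 : Int) 1 (j : Int)
      rw [pvF]
      by_cases hj2 : A0 ≤ j
      · rw [if_pos ⟨hj2, by omega⟩, if_pos (by exact_mod_cast hj2)]
      · rw [if_neg (by omega), if_neg (by
          intro hge
          exact hj2 (by exact_mod_cast hge))]
    · rw [if_neg h]
      by_cases h2 : k ≤ 1
      · rw [if_pos h2, show k = 0 by omega, pvRow, pvZeros_eq_map]
        rfl
      · rw [if_neg h2]
  · -- first > num: the range is empty and row 1 is all zeros
    rw [PySem.List.pyRange_one_eq_nil (by omega), List.foldl_nil]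
    unfold pvTab
    apply List.map_congr_left
    intro k _
    by_cases h : k ≤ 0
    · rw [if_pos h, if_pos (by omega)]
    · by_cases h1 : k = 1
      · rw [if_neg h, if_pos (by omega), h1, pvRow, pvZeros_eq_map]
        apply List.map_congr_left
        intro j hj
        simp only [List.mem_range] at hj
        rw [pvF, if_neg (by omega)]
      · rw [if_neg h, if_neg (by omega)]


theorem pvA_eq_pvF (num : Int) (n : Int) (arr : List Int) (h0 : 0 ≤ num)
    (hne : arr ≠ []) (hnn : ∀ x ∈ arr, 0 ≤ x) :
    pvListA num n arr = pvF arr (PySem.List.pyGetD arr 0 0) arr.length num := by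
  obtain ⟨N, rfl⟩ : ∃ N : Nat, num = (N : Int) := ⟨num.toNat, (Int.toNat_of_nonneg h0).symm⟩
  set first := PySem.List.pyGetD arr 0 0 with hfirst
  have hf : 0 ≤ first := pvW_nonneg arr hnn 0
  set L := arr.length with hLdef
  have hL : 1 ≤ L := List.length_pos_iff.mpr hne
  simp only [pvListA]
  rw [show ((N : Int) + 1).toNat = N + 1 by omega, ← hfirst, ← hLdef]
  rw [pv_row1_fold arr first N L hf hnn hL]
  rw [show ((L : Int) + 1) = (((L - 1 : Nat)) : Int) + 2 by omega]
  rw [pv_outer_fold arr first N L hf hnn (L - 1) (by omega)]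
  rw [show L - 1 + 1 = L by omega]
  have hTne : pvTab arr first N L L ≠ [] := by
    simp [pvTab, List.range_eq_nil]
  unfold pvGet2
  rw [PySem.List.pyGetD_neg_one _ _ hTne, List.getLast_eq_getElem]
  have hlen : (pvTab arr first N L L).length = L + 1 := by
    simp [pvTab]
  simp only [hlen]
  unfold pvTab
  rw [List.getElem_map]
  simp only [List.getElem_range]
  rw [show L + 1 - 1 = L by omega, if_pos le_rfl]
  have hRne : pvRow arr first N L ≠ [] := by
    simp [pvRow, List.range_eq_nil]
  rw [PySem.List.pyGetD_neg_one _ _ hRne, List.getLast_eq_getElem]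
  have hrlen : (pvRow arr first N L).length = N + 1 := by
    simp [pvRow]
  simp only [hrlen]
  unfold pvRow
  rw [List.getElem_map]
  simp only [List.getElem_range]
  rw [show N + 1 - 1 = N by omega]

-- ---- bridge: the Array port equals the list-level model ----

-- bridges
theorem pvAGetD_eq {α : Type} (T : Array α) (i : Int) (d : α) :
    pvAGetD T i d = PySem.List.pyGetD T.toList i d := by
  unfold pvAGetD PySem.List.pyGetD PySem.List.pyGet?
  rw [show T.toList.length = T.size by simp]
  cases hk : PySem.List.pyIdx? T.size i with
  | none => rfl
  | some k =>
    simp only [Option.bind_some]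
    rw [Array.getD]
    split
    · rename_i h
      rw [List.getElem?_eq_getElem (by simpa using h)]
      simp [Array.getElem_toList]
    · rename_i h
      rw [List.getElem?_eq_none (by simp; omega)]
      rfl

theorem pyIdx?_lt {n : Nat} {i : Int} {k : Nat} (h : PySem.List.pyIdx? n i = some k) : k < n := by
  unfold PySem.List.pyIdx? at h
  split at h <;> split at h <;> simp_all <;> omega

theorem toList_pvASetD {α : Type} (T : Array α) (i : Int) (v : α) :
    (pvASetD T i v).toList = PySem.List.pySetD T.toList i v := by
  unfold pvASetD PySem.List.pySetD PySem.List.pySet?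
  rw [show T.toList.length = T.size by simp]
  cases hk : PySem.List.pyIdx? T.size i with
  | none => rfl
  | some k => simp [Array.toList_setIfInBounds]

theorem aGet2_eq (T : Array (Array Int)) (i j : Int) :
    aGet2 T i j = pvGet2 (T.toList.map Array.toList) i j := by
  unfold aGet2 pvGet2
  rw [show ([] : List Int) = Array.toList #[] from rfl, PySem.List.pyGetD_map,
    pvAGetD_eq, pvAGetD_eq]

theorem pySetD_idx_some {α : Type} (L : List α) (i : Int) {k : Nat}
    (h : PySem.List.pyIdx? L.length i = some k) (v : α) :
    PySem.List.pySetD L i v = L.set k v := by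
  unfold PySem.List.pySetD PySem.List.pySet?
  rw [h]
  rfl

theorem pySetD_idx_none {α : Type} (L : List α) (i : Int)
    (h : PySem.List.pyIdx? L.length i = none) (v : α) :
    PySem.List.pySetD L i v = L := by
  unfold PySem.List.pySetD PySem.List.pySet?
  rw [h]
  rfl

theorem aSet2_eq (T : Array (Array Int)) (i j : Int) (v : Int) :
    (aSet2 T i j v).toList.map Array.toList = pvSet2 (T.toList.map Array.toList) i j v := by
  unfold aSet2 pvSet2
  have hlen : (T.toList.map Array.toList).length = T.size := by simp
  cases hk : PySem.List.pyIdx? T.size i with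
  | none =>
    simp only [hk]
    rw [pySetD_idx_none _ i (by rw [hlen, hk])]
  | some k =>
    have hlt := pyIdx?_lt hk
    have hrow : PySem.List.pyGetD (T.toList.map Array.toList) i [] = (T[k]).toList := by
      rw [show ([] : List Int) = Array.toList #[] from rfl, PySem.List.pyGetD_map,
        ← pvAGetD_eq]
      unfold pvAGetD
      simp only [hk]
      rw [Array.getD, dif_pos hlt]
      rfl
    simp only [hk]
    rw [pySetD_idx_some _ i (by rw [hlen, hk]), hrow, ← toList_pvASetD]
    apply List.ext_getElem
    · simp
    · intro p hp hp2
      simp only [List.getElem_map, Array.getElem_toList, Array.getElem_modify]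
      simp only [List.length_map, Array.length_toList, Array.size_modify] at hp hp2
      by_cases hpk : k = p
      · subst hpk
        rw [if_pos rfl, List.getElem_set_self (by simpa using hp2)]
      · rw [if_neg hpk, List.getElem_set_ne hpk]
        simp [Array.getElem_toList]

theorem pvA_bridge (num : Int) (n : Int) (arr : List Int) :
    strawberry1 num n arr = pvListA num n arr := by
  simp only [strawberry1, pvListA]
  have h0 : (Array.replicate (arr.length + 1)
        (Array.replicate (num + 1).toNat (0 : Int))).toList.map Array.toList
      = List.replicate (arr.length + 1) (List.replicate (num + 1).toNat (0 : Int)) := by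
    simp [Array.toList_replicate, List.map_replicate]
  have hrow : ∀ (init : Array (Array Int)),
      (PySem.List.pyRange (PySem.List.pyGetD arr 0 0) (num + 1) 1).foldl
          (fun dp i => pvSet2 dp 1 i (PySem.List.pyGetD arr 0 0))
          (init.toList.map Array.toList)
        = ((PySem.List.pyRange (PySem.List.pyGetD arr 0 0) (num + 1) 1).foldl
            (fun dp i => aSet2 dp 1 i (PySem.List.pyGetD arr 0 0)) init).toList.map
            Array.toList :=
    fun init => List.foldl_hom (f := fun T : Array (Array Int) => T.toList.map Array.toList)
      (fun x y => by simp only [← aSet2_eq])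
  have houter : ∀ (init : Array (Array Int)),
      (PySem.List.pyRange 2 ((arr.length : Int) + 1) 1).foldl (fun dp i =>
          (PySem.List.pyRange 1 (num + 1) 1).foldl (fun dp j =>
            if j ≥ PySem.List.pyGetD arr (i - 1) 0 then
              pvSet2 (pvSet2 dp i j (pvGet2 dp (i - 1) j)) i j
                (max (pvGet2 (pvSet2 dp i j (pvGet2 dp (i - 1) j)) i j)
                  (pvGet2 (pvSet2 dp i j (pvGet2 dp (i - 1) j)) (i - 2)
                      (j - PySem.List.pyGetD arr (i - 1) 0) +
                    PySem.List.pyGetD arr (i - 1) 0))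
            else pvSet2 dp i j (pvGet2 dp (i - 1) j)) dp)
          (init.toList.map Array.toList)
        = ((PySem.List.pyRange 2 ((arr.length : Int) + 1) 1).foldl (fun dp i =>
            (PySem.List.pyRange 1 (num + 1) 1).foldl (fun dp j =>
              if j ≥ PySem.List.pyGetD arr (i - 1) 0 then
                aSet2 (aSet2 dp i j (aGet2 dp (i - 1) j)) i j
                  (max (aGet2 (aSet2 dp i j (aGet2 dp (i - 1) j)) i j)
                    (aGet2 (aSet2 dp i j (aGet2 dp (i - 1) j)) (i - 2)
                        (j - PySem.List.pyGetD arr (i - 1) 0) +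
                      PySem.List.pyGetD arr (i - 1) 0))
              else aSet2 dp i j (aGet2 dp (i - 1) j)) dp) init).toList.map Array.toList :=
    fun init => List.foldl_hom (f := fun T : Array (Array Int) => T.toList.map Array.toList)
      (fun x i => List.foldl_hom (f := fun T : Array (Array Int) => T.toList.map Array.toList)
        (fun x' j => by
          simp only [← aGet2_eq, ← aSet2_eq,
            apply_ite (fun T : Array (Array Int) => List.map Array.toList T.toList)]))
  rw [aGet2_eq]
  congr 1
  rw [← houter, ← hrow, h0]

-- ===== VERDICT (by name: the statement is the Claim_ definition above) =====
theorem strawberry1_spec : Claim_equal_strawberry1 := by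
  intro num n arr _ hpre
  obtain ⟨h0, hne, hnn⟩ := hpre
  unfold Spec_strawberry1
  rw [pvA_bridge, pvA_eq_pvF num n arr h0 hne hnn, pvAlt_eq_pvF]
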